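-- pv_equiv track=rewrite | github.com/alecott/alecott42 | Expert_system/rules_application.py | create_tab
-- ===== SOURCE A (Python) =====
-- def create_tab(str):
--     tab = []
--     tmp = ""
--     for c in str:
--         tmp = tmp + c
--         if (c != '!'):
--             tab.append(tmp)
--             tmp = ""
--     return (tab)
-- ===== SOURCE B (Python) =====
-- import re
--
-- def create_tab(str):
--     # One regex pass: each token is a maximal run of '!' followed by one
--     # non-'!' character; a trailing run of '!' has no closer and is dropped,
--     # exactly as A's unfinished tmp buffer is.
--     return re.findall(r'!*[^!]', str)
-- ===== Notes on version B (the rewrite author's own statement) =====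
-- stated objective: idiomatic
-- what changed: Replaced the manual accumulate-and-flush character loop with a single re.findall over the pattern !*[^!], which tokenizes the string in one library call.
import Mathlib
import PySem

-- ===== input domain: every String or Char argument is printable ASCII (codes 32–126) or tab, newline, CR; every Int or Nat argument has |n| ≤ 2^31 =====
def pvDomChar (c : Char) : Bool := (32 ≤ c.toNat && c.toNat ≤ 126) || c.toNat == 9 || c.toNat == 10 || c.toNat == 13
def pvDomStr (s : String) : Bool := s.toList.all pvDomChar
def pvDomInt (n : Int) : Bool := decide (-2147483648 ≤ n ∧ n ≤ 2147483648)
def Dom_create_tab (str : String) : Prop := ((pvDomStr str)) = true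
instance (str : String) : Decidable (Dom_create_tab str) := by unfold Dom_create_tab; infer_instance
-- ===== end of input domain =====

-- B replaces A's manual accumulate-and-flush loop by one re.findall(r'!*[^!]', str)
-- call (ported below as a takeWhile/dropWhile scan, exact for this pattern): idiomatic,
-- same behaviour, trailing lone '!' run dropped in both.

-- ===== PORT A =====
-- the for-loop of A over characters, with its two pieces of state (tab, tmp)
def createTabLoop (tab : List String) (tmp : String) : List Char → List String
  | [] => tab
  | c :: rest =>
    let tmp' := tmp.push c
    if c ≠ '!' then createTabLoop (tab ++ [tmp']) "" rest
    else createTabLoop tab tmp' rest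

def create_tab (str : String) : List String :=
  createTabLoop [] "" str.toList

-- ===== PORT B =====
-- re.findall(r'!*[^!]', str): each match is a maximal run of '!' followed by one
-- non-'!' char; exact hand port of this regex's left-to-right matching.
def findallBangs (cs : List Char) : List String :=
  match h : cs.dropWhile (· == '!') with
  | [] => []
  | c :: rest => String.ofList (cs.takeWhile (· == '!') ++ [c]) :: findallBangs rest
termination_by cs.length
decreasing_by
  have hle : (cs.dropWhile (· == '!')).length ≤ cs.length := List.length_dropWhile_le _ _
  rw [h] at hle; simp at hle ⊢; omega

def create_tab_alt (str : String) : List String :=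
  findallBangs str.toList

-- ===== PRECONDITION & SPEC =====
def Spec_create_tab (str : String) (out : List String) : Prop := out = create_tab_alt str
instance (str : String) (out : List String) : Decidable (Spec_create_tab str out) := by unfold Spec_create_tab; infer_instance

-- ===== CLAIM (what is proved, stated in full; the proofs are below) =====
def Claim_equal_create_tab : Prop := ∀ (str : String), Dom_create_tab str → Spec_create_tab str (create_tab str)

-- ===== LEMMAS AND PROOFS =====

theorem push_ofList (tl : List Char) (c : Char) :
    (String.ofList tl).push c = String.ofList (tl ++ [c]) := by
  apply String.toList_inj.mp; simp

theorem dropWhile_bangs_nil (tl : List Char) (hb : ∀ x ∈ tl, x = '!') :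
    tl.dropWhile (· == '!') = [] := by
  rw [List.dropWhile_eq_nil_iff]; intro x hx; simp [hb x hx]

theorem findallBangs_all_bangs (tl : List Char) (hb : ∀ x ∈ tl, x = '!') :
    findallBangs tl = [] := by
  unfold findallBangs
  split
  · rfl
  · next c rest h => rw [dropWhile_bangs_nil tl hb] at h; exact absurd h (by simp)

theorem dropWhile_bangs_append (tl : List Char) (hb : ∀ x ∈ tl, x = '!')
    (c : Char) (hc : ¬ c = '!') (rest : List Char) :
    (tl ++ c :: rest).dropWhile (· == '!') = c :: rest := by
  induction tl with
  | nil => simp [hc]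
  | cons x xs ih =>
    have hx : x = '!' := hb x (by simp)
    subst hx
    simp only [List.cons_append, List.dropWhile_cons]
    rw [if_pos (by simp)]
    exact ih (fun y hy => hb y (by simp [hy]))

theorem takeWhile_bangs_append (tl : List Char) (hb : ∀ x ∈ tl, x = '!')
    (c : Char) (hc : ¬ c = '!') (rest : List Char) :
    (tl ++ c :: rest).takeWhile (· == '!') = tl := by
  induction tl with
  | nil => simp [hc]
  | cons x xs ih =>
    have hx : x = '!' := hb x (by simp)
    subst hx
    simp only [List.cons_append, List.takeWhile_cons]
    rw [if_pos (by simp)]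
    rw [ih (fun y hy => hb y (by simp [hy]))]

theorem createTabLoop_eq (cs : List Char) :
    ∀ (tab : List String) (tl : List Char), (∀ x ∈ tl, x = '!') →
      createTabLoop tab (String.ofList tl) cs = tab ++ findallBangs (tl ++ cs) := by
  induction cs with
  | nil =>
    intro tab tl hb
    simp [createTabLoop, findallBangs_all_bangs tl hb]
  | cons c rest ih =>
    intro tab tl hb
    by_cases hc : c = '!'
    · subst hc
      have hb' : ∀ x ∈ tl ++ ['!'], x = '!' := by
        intro x hx
        rcases List.mem_append.1 hx with h | h
        · exact hb x h
        · simpa using h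
      simp only [createTabLoop]
      rw [if_neg (by simp), push_ofList, ih tab (tl ++ ['!']) hb']
      simp
    · have hdrop := dropWhile_bangs_append tl hb c hc rest
      have htake := takeWhile_bangs_append tl hb c hc rest
      simp only [createTabLoop]
      rw [if_pos hc, push_ofList, ih (tab ++ [String.ofList (tl ++ [c])]) [] (by simp)]
      simp only [List.nil_append]
      conv_rhs => rw [findallBangs]
      split
      · next h => rw [hdrop] at h; exact absurd h (by simp)
      · next c' rest' h =>
        rw [hdrop] at h
        injection h with h1 h2
        subst h1; subst h2
        simp [htake]

-- ===== VERDICT (by name: the statement is the Claim_ definition above) =====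
theorem create_tab_spec : Claim_equal_create_tab := by
  intro s _
  unfold Spec_create_tab create_tab create_tab_alt
  have h := createTabLoop_eq s.toList [] [] (by simp)
  simpa using h
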